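-- pv_equiv track=rewrite | github.com/HedonisticOpportunist/4x4-Puzzles | main.py | permute_vector
-- ===== SOURCE A (Python) =====
-- from queue import Queue
--
-- def permute_vector(row, p):
--     queue = Queue(maxsize=4)
--     if p == 0 or p > 3:
--         return row
--     else:
--
--         # place all vector rows into the empty
--         # queue
--         for element in row:
--             queue.put(element)
--
--         # get the head of the queue
--         # put the head into the queue
--         for item in range(p):
--             head = queue.get()
--             queue.put(head)
--
--         # copying queue into row
--         row = list(queue.queue)
--         return row
-- ===== SOURCE B (Python) =====
-- def permute_vector(row, p):
--     if 0 < p <= 3: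
--         k = p % len(row)
--         return row[k:] + row[:k]
--     return row
-- ===== Notes on version B (the rewrite author's own statement) =====
-- stated objective: simpler
-- what changed: Replaces the Queue and its p enqueue/dequeue rotation cycles by a single index split row[k:]+row[:k] with k = p % len(row); Pre_ excludes only inputs on which A never returns (Queue.put blocks when len(row) > 4, Queue.get blocks on an empty row with 0 < p <= 3).
import Mathlib
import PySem

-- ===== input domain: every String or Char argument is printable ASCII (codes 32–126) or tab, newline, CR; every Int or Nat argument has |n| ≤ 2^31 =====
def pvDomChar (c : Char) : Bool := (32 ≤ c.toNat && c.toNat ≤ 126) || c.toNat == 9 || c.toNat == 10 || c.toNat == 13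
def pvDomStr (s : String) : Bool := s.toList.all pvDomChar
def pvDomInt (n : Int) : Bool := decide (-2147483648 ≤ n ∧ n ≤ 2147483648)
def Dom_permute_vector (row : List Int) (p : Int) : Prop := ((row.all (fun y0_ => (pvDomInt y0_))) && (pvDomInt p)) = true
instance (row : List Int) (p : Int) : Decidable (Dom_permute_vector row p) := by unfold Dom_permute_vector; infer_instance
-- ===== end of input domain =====

-- B replaces A's Queue with p enqueue/dequeue cycles by a single index split row[k:]+row[:k] with k = p % len(row): simpler.
-- Equivalence is about the RETURN value only.

-- ===== PORT A =====
def permute_vector (row : List Int) (p : Int) : List Int :=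
  if p = 0 ∨ p > 3 then row
  else
    -- place all vector rows into the empty queue
    let queue : List Int := row.foldl (fun q element => q ++ [element]) []
    -- get the head of the queue, put the head into the queue
    let queue := (PySem.List.pyRange 0 p 1).foldl
      (fun q _ =>
        match q with
        | [] => []            -- Queue.get would block forever here; Pre_ excludes this
        | head :: t => t ++ [head]) queue
    queue

-- ===== PORT B =====
def permute_vector_alt (row : List Int) (p : Int) : List Int :=
  if 0 < p ∧ p ≤ 3 then
    let k := PySem.Int.mod p (row.length)
    PySem.List.slice row (some k) none ++ PySem.List.slice row none (some k)
  else row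

-- ===== PRECONDITION & SPEC =====
-- Pre_ excludes exactly the inputs where A never returns: Queue.put blocks when len(row) > 4
-- (the queue has maxsize 4) and Queue.get blocks when 0 < p ≤ 3 with an empty row.
def Pre_permute_vector (row : List Int) (p : Int) : Prop :=
  (p = 0 ∨ 3 < p) ∨ (row.length ≤ 4 ∧ (0 < p → row ≠ []))
instance (row : List Int) (p : Int) : Decidable (Pre_permute_vector row p) := by
  unfold Pre_permute_vector; infer_instance
def pvWitness_permute_vector : List Int × Int := ([1, 2, 3, 4], 2)
def Spec_permute_vector (row : List Int) (p : Int) (out : List Int) : Prop := out = permute_vector_alt row p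
instance (row : List Int) (p : Int) (out : List Int) : Decidable (Spec_permute_vector row p out) := by unfold Spec_permute_vector; infer_instance

-- ===== CLAIM (what is proved, stated in full; the proofs are below) =====
def Claim_equal_permute_vector : Prop := ∀ (row : List Int) (p : Int), Dom_permute_vector row p → Pre_permute_vector row p → Spec_permute_vector row p (permute_vector row p)

-- ===== LEMMAS AND PROOFS =====

theorem build_queue (acc : List Int) (row : List Int) :
    List.foldl (fun q element => q ++ [element]) acc row = acc ++ row := by
  induction row generalizing acc with
  | nil => simp
  | cons h t ih => simp [List.foldl, ih]

theorem permute_vector_spec : Claim_equal_permute_vector := by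
  intro row p _ hpre
  unfold Spec_permute_vector permute_vector permute_vector_alt
  by_cases h0 : p = 0 ∨ p > 3
  · rw [if_pos h0, if_neg (by omega : ¬ (0 < p ∧ p ≤ 3))]
  · rw [if_neg h0]
    by_cases hneg : p < 0
    · rw [PySem.List.pyRange_one_eq_nil (by omega : p ≤ 0)]
      simp only [build_queue, List.foldl_nil, List.nil_append]
      rw [if_neg (by omega : ¬ (0 < p ∧ p ≤ 3))]
    · have hp : 0 < p := by omega
      have hp3 : p ≤ 3 := by omega
      rw [if_pos ⟨hp, hp3⟩]
      simp only [build_queue, List.nil_append]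
      rcases hpre with h | ⟨hlen, hne⟩
      · omega
      · have hne := hne hp
        interval_cases p <;>
        · match row, hne, hlen with
          | [a], _, _ => simp [PySem.List.pyRange, List.range_succ, PySem.Int.mod,
              PySem.List.slice, PySem.List.clampIdx]
          | [a, b], _, _ => simp [PySem.List.pyRange, List.range_succ, PySem.Int.mod,
              PySem.List.slice, PySem.List.clampIdx]
          | [a, b, c], _, _ => simp [PySem.List.pyRange, List.range_succ, PySem.Int.mod,
              PySem.List.slice, PySem.List.clampIdx]
          | [a, b, c, d], _, _ => simp [PySem.List.pyRange, List.range_succ, PySem.Int.mod,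
              PySem.List.slice, PySem.List.clampIdx]

-- ===== VERDICT (by name: the statement is the Claim_ definition above) =====
-- (permute_vector_spec proved directly above)
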